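-- pv_equiv track=rewrite | github.com/ash-myth/MediBot_ml | nlp_utils.py | classify_urgency_level
-- ===== SOURCE A (Python) =====
-- from typing import Dict, List, Tuple, Set
--
-- def classify_urgency_level(symptoms: List[str], severity_scores: Dict[str, str]) -> str:
--     """Classify urgency level based on symptoms and severity"""
--     high_urgency_symptoms = [
--         "chest_pain", "shortness_of_breath", "severe_headache",
--         "high_fever", "difficulty_breathing", "severe_abdominal_pain"
--     ]
--
--     moderate_urgency_symptoms = [
--         "fever", "persistent_cough", "severe_nausea", "vomiting"
--     ]
--
--     # Check for high urgency
--     for symptom in symptoms: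
--         if symptom in high_urgency_symptoms:
--             if severity_scores.get(symptom, "mild") in ["severe", "extreme"]:
--                 return "high"
--
--     # Check for moderate urgency
--     severe_count = sum(1 for s in symptoms if severity_scores.get(s, "mild") == "severe")
--     if severe_count >= 2 or any(s in moderate_urgency_symptoms for s in symptoms):
--         return "moderate"
--
--     return "low"
-- ===== SOURCE B (Python) =====
-- def classify_urgency_level(symptoms, severity_scores):
--     """Classify urgency level based on symptoms and severity"""
--     high_urgency_symptoms = {
--         "chest_pain", "shortness_of_breath", "severe_headache",
--         "high_fever", "difficulty_breathing", "severe_abdominal_pain"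
--     }
--     moderate_urgency_symptoms = {"fever", "persistent_cough", "severe_nausea", "vomiting"}
--
--     high_found = False
--     moderate_found = False
--     severe_count = 0
--     for s in symptoms:
--         sev = severity_scores.get(s, "mild")
--         if s in high_urgency_symptoms and sev in ("severe", "extreme"):
--             high_found = True
--         if sev == "severe":
--             severe_count += 1
--         if s in moderate_urgency_symptoms:
--             moderate_found = True
--
--     if high_found:
--         return "high"
--     if severe_count >= 2 or moderate_found:
--         return "moderate"
--     return "low"
-- ===== Notes on version B (the rewrite author's own statement) =====
-- stated objective: alternative
-- what changed: A's three separate passes (an early-return loop over symptoms plus two more full scans for the severe count and the moderate check) are fused into one loop that maintains three accumulators (high_found, severe_count, moderate_found) with a single decision after the loop; the urgency lists become sets.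
import Mathlib
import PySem

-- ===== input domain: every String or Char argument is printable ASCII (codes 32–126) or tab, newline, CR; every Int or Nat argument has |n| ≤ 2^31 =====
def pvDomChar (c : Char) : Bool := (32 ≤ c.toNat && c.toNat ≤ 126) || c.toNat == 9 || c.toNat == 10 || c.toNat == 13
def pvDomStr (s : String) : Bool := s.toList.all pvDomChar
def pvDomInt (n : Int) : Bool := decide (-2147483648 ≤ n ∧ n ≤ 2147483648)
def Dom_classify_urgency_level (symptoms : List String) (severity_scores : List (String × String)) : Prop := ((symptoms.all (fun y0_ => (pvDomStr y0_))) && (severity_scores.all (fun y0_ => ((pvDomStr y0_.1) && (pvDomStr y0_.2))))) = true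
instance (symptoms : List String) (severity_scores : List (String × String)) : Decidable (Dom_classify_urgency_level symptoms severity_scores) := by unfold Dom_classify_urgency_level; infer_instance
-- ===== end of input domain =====

-- B fuses A's three passes over `symptoms` (early-return high loop, severe-count sum, moderate any)
-- into one loop with three accumulators and a single decision after it; objective: alternative decomposition.


-- dict lookup d.get(k, dflt): first match in the association list (exact for the dict convention)
def pvGetD (d : List (String × String)) (k dflt : String) : String :=
  match d.find? (fun p => p.1 == k) with
  | some p => p.2
  | none => dflt

-- ===== PORT A =====
def pvHighList : List String :=
  ["chest_pain", "shortness_of_breath", "severe_headache",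
   "high_fever", "difficulty_breathing", "severe_abdominal_pain"]

def pvModList : List String :=
  ["fever", "persistent_cough", "severe_nausea", "vomiting"]

-- A's first loop with its early 'return "high"'
def pvALoop (severity_scores : List (String × String)) : List String → Option String
  | [] => none
  | symptom :: rest =>
    if pvHighList.contains symptom then
      if ["severe", "extreme"].contains (pvGetD severity_scores symptom "mild") then
        some "high"
      else pvALoop severity_scores rest
    else pvALoop severity_scores rest

def classify_urgency_level (symptoms : List String) (severity_scores : List (String × String)) : String :=
  match pvALoop severity_scores symptoms with
  | some r => r
  | none =>
    let severe_count : Int :=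
      symptoms.foldl (fun acc s => if pvGetD severity_scores s "mild" == "severe" then acc + 1 else acc) 0
    if severe_count ≥ 2 || symptoms.any (fun s => pvModList.contains s) then "moderate"
    else "low"

-- ===== PORT B =====
def pvHighSet : PySem.Set String := PySem.Set.ofList
  ["chest_pain", "shortness_of_breath", "severe_headache",
   "high_fever", "difficulty_breathing", "severe_abdominal_pain"]

def pvModSet : PySem.Set String := PySem.Set.ofList
  ["fever", "persistent_cough", "severe_nausea", "vomiting"]

-- one fused pass: state = (high_found, severe_count, moderate_found)
def pvBStep (severity_scores : List (String × String)) (st : Bool × Int × Bool) (s : String) :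
    Bool × Int × Bool :=
  let sev := pvGetD severity_scores s "mild"
  (st.1 || (PySem.Set.contains pvHighSet s && (sev == "severe" || sev == "extreme")),
   if sev == "severe" then st.2.1 + 1 else st.2.1,
   st.2.2 || PySem.Set.contains pvModSet s)

def classify_urgency_level_alt (symptoms : List String) (severity_scores : List (String × String)) : String :=
  let st := symptoms.foldl (pvBStep severity_scores) (false, 0, false)
  if st.1 then "high"
  else if st.2.1 ≥ 2 || st.2.2 then "moderate"
  else "low"

-- ===== PRECONDITION & SPEC =====
def Spec_classify_urgency_level (symptoms : List String) (severity_scores : List (String × String)) (out : String) : Prop := out = classify_urgency_level_alt symptoms severity_scores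
instance (symptoms : List String) (severity_scores : List (String × String)) (out : String) : Decidable (Spec_classify_urgency_level symptoms severity_scores out) := by unfold Spec_classify_urgency_level; infer_instance

-- ===== CLAIM (what is proved, stated in full; the proofs are below) =====
def Claim_equal_classify_urgency_level : Prop := ∀ (symptoms : List String) (severity_scores : List (String × String)), Dom_classify_urgency_level symptoms severity_scores → Spec_classify_urgency_level symptoms severity_scores (classify_urgency_level symptoms severity_scores)

-- ===== LEMMAS AND PROOFS =====

-- the per-symptom "high" condition, shared by both characterisations
def pvIsHigh (d : List (String × String)) (s : String) : Bool :=
  pvHighList.contains s && ((pvGetD d s "mild" == "severe") || (pvGetD d s "mild" == "extreme"))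

lemma highSet_eq : pvHighSet = pvHighList := by decide
lemma modSet_eq : pvModSet = pvModList := by decide

lemma contains_two (v : String) :
    (["severe", "extreme"] : List String).contains v = ((v == "severe") || (v == "extreme")) := by
  cases hs : v == "severe" <;> cases he : v == "extreme" <;> simp_all [List.contains_cons]

lemma aloop_eq_any (d : List (String × String)) (l : List String) :
    pvALoop d l = (if l.any (pvIsHigh d) then some "high" else none) := by
  induction l with
  | nil => rfl
  | cons x xs ih =>
    simp only [pvALoop, List.any_cons, pvIsHigh, contains_two, ih]
    by_cases hb : x ∈ pvHighList <;>
      by_cases hc : (pvGetD d x "mild" == "severe" || pvGetD d x "mild" == "extreme") = true <;>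
        simp [hb, hc]

lemma bfold_eq (d : List (String × String)) (l : List String) :
    ∀ (h : Bool) (c : Int) (m : Bool),
      l.foldl (pvBStep d) (h, c, m) =
        (h || l.any (pvIsHigh d),
         c + (l.countP (fun s => pvGetD d s "mild" == "severe") : Int),
         m || l.any (fun s => pvModList.contains s)) := by
  induction l with
  | nil => intro h c m; simp
  | cons x xs ih =>
    intro h c m
    simp only [List.foldl_cons, List.any_cons, List.countP_cons, pvBStep, highSet_eq, modSet_eq,
      PySem.Set.contains_eq_listContains]
    rw [ih]
    refine Prod.ext ?_ (Prod.ext ?_ ?_)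
    · simp only [pvIsHigh]
      cases h <;> cases hb : pvHighList.contains x <;>
        cases hs : (pvGetD d x "mild" == "severe") <;>
          cases he : (pvGetD d x "mild" == "extreme") <;> simp [hb, hs, he]
    · cases hs : (pvGetD d x "mild" == "severe") <;> simp [hs] <;> push_cast <;> ring
    · cases m <;> cases hm : pvModList.contains x <;> simp [hm]

lemma both_eq (symptoms : List String) (d : List (String × String)) :
    classify_urgency_level symptoms d = classify_urgency_level_alt symptoms d := by
  unfold classify_urgency_level classify_urgency_level_alt
  rw [aloop_eq_any, bfold_eq,
    PySem.List.foldl_if_add_one (p := fun s => pvGetD d s "mild" == "severe")]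
  by_cases hh : symptoms.any (pvIsHigh d)
  · simp [hh]
  · simp [hh]

-- ===== VERDICT (by name: the statement is the Claim_ definition above) =====
theorem classify_urgency_level_spec : Claim_equal_classify_urgency_level := by
  intro symptoms severity_scores _
  unfold Spec_classify_urgency_level
  exact both_eq symptoms severity_scores
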